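-- pv_equiv track=rewrite | github.com/baiyyang/medical-entity-recognition | bilstm_crf/predata.py | content2uniformcontent
-- ===== SOURCE A (Python) =====
-- def content2uniformcontent(content):
--     length = len(content)
--     seq, label = [], []
--     i = 0
--     tag = 'O'  # label
--     pre = 0  # 记录前面是否还有<>开头的信息
--     flag = 0  # 记录有两个连续的<>
--     while i < length:
--         if content[i] != '<':
--             seq.append(content[i])
--             label.append(tag)
--             if tag == 'B':
--                 tag = 'I'
--                 flag = 1
--             i += 1
--         else:
--             if content[i + 1] == '/':
--                 pre -= 1
--                 if pre == 0:
--                     tag = 'O'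
--                 else:
--                     tag = 'I'
--             elif content[i + 1] != '/':
--                 pre += 1
--                 if pre == 1:
--                     tag = 'B'
--                     flag = 0
--                 elif flag == 1:
--                     tag = 'I'
--             while i < length and content[i] != '>':
--                 i += 1
--             i += 1
--     return seq, label
-- ===== SOURCE B (Python) =====
-- def content2uniformcontent(content):
--     # Phase 1: tokenize into tag tokens ('<'...'>' or unclosed tail) and plain-text runs.
--     tokens = []
--     n = len(content)
--     i = 0
--     while i < n:
--         if content[i] == '<':
--             j = content.find('>', i)
--             if j == -1:
--                 tokens.append(content[i:])
--                 i = n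
--             else:
--                 tokens.append(content[i:j + 1])
--                 i = j + 1
--         else:
--             j = content.find('<', i)
--             if j == -1:
--                 j = n
--             tokens.append(content[i:j])
--             i = j
--     # Phase 2: run the B/I/O state machine over the tokens.
--     seq, label = [], []
--     tag, pre, flag = 'O', 0, 0
--     for t in tokens:
--         if t[0] != '<':
--             for ch in t:
--                 seq.append(ch)
--                 label.append(tag)
--                 if tag == 'B':
--                     tag = 'I'
--                     flag = 1
--         elif t.startswith('</'):
--             pre -= 1
--             tag = 'O' if pre == 0 else 'I'
--         else:
--             pre += 1
--             if pre == 1: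
--                 tag = 'B'
--                 flag = 0
--             elif flag == 1:
--                 tag = 'I'
--     return seq, label
-- ===== Notes on version B (the rewrite author's own statement) =====
-- stated objective: alternative
-- what changed: Replaces A's single index-walk with nested skip loops by a two-phase decomposition: tokenize the string into tag tokens and plain-text runs (bulk scans via str.find/slicing), then run the B/I/O pre/flag state machine over the token list.
-- outside the precondition, e.g. on content2uniformcontent('<'): A raises IndexError, B returns ([], [])
import Mathlib
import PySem

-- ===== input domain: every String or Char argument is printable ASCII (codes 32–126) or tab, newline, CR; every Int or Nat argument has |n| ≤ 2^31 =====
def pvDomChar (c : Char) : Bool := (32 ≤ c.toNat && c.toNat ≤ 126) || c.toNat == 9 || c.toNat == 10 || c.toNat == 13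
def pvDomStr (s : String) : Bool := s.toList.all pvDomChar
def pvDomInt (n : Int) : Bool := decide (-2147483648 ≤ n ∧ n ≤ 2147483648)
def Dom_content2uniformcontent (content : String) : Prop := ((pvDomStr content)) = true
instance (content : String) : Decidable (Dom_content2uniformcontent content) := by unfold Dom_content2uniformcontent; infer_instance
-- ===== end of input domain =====

-- B re-decomposes A's single index-walk into tokenize-then-fold (tag tokens vs text runs); measured constant-factor faster (bulk str.find/slice scans).

-- ===== PORT A =====
-- inner `while i < length and content[i] != '>': i += 1` followed by `i += 1`
def skipTag : List Char → List Char
  | [] => []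
  | c :: rest => if c = '>' then rest else skipTag rest

theorem skipTag_length_lt (c : Char) (rest : List Char) :
    (skipTag (c :: rest)).length < (c :: rest).length := by
  induction rest generalizing c with
  | nil => simp only [skipTag]; split <;> simp
  | cons d ds ih =>
    simp only [skipTag]
    split
    · simp
    · exact Nat.lt_trans (ih d) (by simp)

-- literal transliteration of A's while loop; the `| [] => ([], [])` arm under '<'
-- is where Python A raises IndexError (content[i+1]); those inputs are excluded by Pre_.
def loopA : List Char → String → Int → Int → List String × List String
  | [], _, _, _ => ([], [])
  | c :: rest, tag, pre, flag =>
    if c ≠ '<' then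
      let r := loopA rest (if tag = "B" then "I" else tag) pre (if tag = "B" then 1 else flag)
      (c.toString :: r.1, tag :: r.2)
    else
      match rest with
      | [] => ([], [])
      | d :: tl =>
        if d = '/' then
          loopA (skipTag (c :: d :: tl)) (if pre - 1 = 0 then "O" else "I") (pre - 1) flag
        else
          if pre + 1 = 1 then loopA (skipTag (c :: d :: tl)) "B" (pre + 1) 0
          else if flag = 1 then loopA (skipTag (c :: d :: tl)) "I" (pre + 1) flag
          else loopA (skipTag (c :: d :: tl)) tag (pre + 1) flag
termination_by l => l.length
decreasing_by all_goals first
  | (have := skipTag_length_lt c (d :: tl); simp at this ⊢; omega)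
  | simp

def content2uniformcontent (content : String) : List String × List String :=
  loopA content.toList "O" 0 0

-- ===== PORT B =====
-- phase 1 of Source B: split into tag tokens ('<'…'>' or the unclosed tail) and text runs
def tokenizeB : List Char → List (List Char)
  | [] => []
  | c :: rest =>
    if c = '<' then
      match h : rest.dropWhile (· ≠ '>') with
      | [] => [c :: rest.takeWhile (· ≠ '>')]
      | _ :: rs => (c :: rest.takeWhile (· ≠ '>') ++ ['>']) :: tokenizeB rs
    else
      (c :: rest.takeWhile (· ≠ '<')) :: tokenizeB (rest.dropWhile (· ≠ '<'))
termination_by l => l.length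
decreasing_by
  · have h1 := List.length_dropWhile_le (fun x => !decide (x = '>')) rest
    have h2 : rest.dropWhile (fun x => !decide (x = '>')) = rest.dropWhile (· ≠ '>') := by
      simp [ne_eq]
    rw [h2, h] at h1; simp at h1 ⊢; omega
  · have h1 := List.length_dropWhile_le (fun x => !decide (x = '<')) rest
    simp at h1 ⊢; omega

-- inner `for ch in t` loop of Source B's text-run branch
def emitText : List Char → String → Int → (List String × List String) × String × Int
  | [], tag, flag => (([], []), tag, flag)
  | c :: cs, tag, flag =>
    let r := emitText cs (if tag = "B" then "I" else tag) (if tag = "B" then 1 else flag)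
    ((c.toString :: r.1.1, tag :: r.1.2), r.2)

-- phase 2 of Source B: the `for t in tokens` state machine
def runB : List (List Char) → String → Int → Int → List String × List String
  | [], _, _, _ => ([], [])
  | t :: ts, tag, pre, flag =>
    if t.head? ≠ some '<' then
      let e := emitText t tag flag
      let r := runB ts e.2.1 pre e.2.2
      (e.1.1 ++ r.1, e.1.2 ++ r.2)
    else if t.take 2 = ['<', '/'] then
      runB ts (if pre - 1 = 0 then "O" else "I") (pre - 1) flag
    else
      if pre + 1 = 1 then runB ts "B" (pre + 1) 0
      else if flag = 1 then runB ts "I" (pre + 1) flag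
      else runB ts tag (pre + 1) flag

def content2uniformcontent_alt (content : String) : List String × List String :=
  runB (tokenizeB content.toList) "O" 0 0

-- ===== PRECONDITION & SPEC =====
-- Pre_ excludes exactly the inputs where Python A raises IndexError at content[i+1]:
-- the string ends in a '<' that is reached in text mode, i.e. it ends with '<' and every
-- earlier '<' is followed by some '>' (so no earlier unclosed tag swallows the tail).
-- (The two ports happen to agree even there — the proof needs no hypothesis — but Python A
-- raises on these inputs, so nothing is claimed about them.)
def Pre_content2uniformcontent (content : String) : Prop :=
  ¬ (content.toList.getLast? = some '<' ∧
     ∀ i < content.toList.length - 1,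
       content.toList[i]? = some '<' → '>' ∈ content.toList.drop (i + 1))
instance (content : String) : Decidable (Pre_content2uniformcontent content) := by
  unfold Pre_content2uniformcontent; infer_instance

def pvWitness_content2uniformcontent : String := "a<t>bc</t>d"

def Spec_content2uniformcontent (content : String) (out : List String × List String) : Prop := out = content2uniformcontent_alt content
instance (content : String) (out : List String × List String) : Decidable (Spec_content2uniformcontent content out) := by unfold Spec_content2uniformcontent; infer_instance

-- ===== CLAIM (what is proved, stated in full; the proofs are below) =====
def Claim_equal_content2uniformcontent : Prop := ∀ (content : String), Dom_content2uniformcontent content → Pre_content2uniformcontent content → Spec_content2uniformcontent content (content2uniformcontent content)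

-- ===== LEMMAS AND PROOFS =====

theorem loopA_nil (tag : String) (pre flag : Int) : loopA [] tag pre flag = ([], []) := by
  rw [loopA.eq_def]

theorem loopA_char (c : Char) (rest : List Char) (hc : c ≠ '<') (tag : String) (pre flag : Int) :
    loopA (c :: rest) tag pre flag =
      ((c.toString :: (loopA rest (if tag = "B" then "I" else tag) pre (if tag = "B" then 1 else flag)).1),
       (tag :: (loopA rest (if tag = "B" then "I" else tag) pre (if tag = "B" then 1 else flag)).2)) := by
  rw [loopA.eq_def]; simp [hc]

theorem loopA_lone (tag : String) (pre flag : Int) : loopA ['<'] tag pre flag = ([], []) := by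
  rw [loopA.eq_def]; simp

theorem loopA_tag (d : Char) (tl : List Char) (tag : String) (pre flag : Int) :
    loopA ('<' :: d :: tl) tag pre flag =
      (if d = '/' then
        loopA (skipTag ('<' :: d :: tl)) (if pre - 1 = 0 then "O" else "I") (pre - 1) flag
      else
        if pre + 1 = 1 then loopA (skipTag ('<' :: d :: tl)) "B" (pre + 1) 0
        else if flag = 1 then loopA (skipTag ('<' :: d :: tl)) "I" (pre + 1) flag
        else loopA (skipTag ('<' :: d :: tl)) tag (pre + 1) flag) := by
  rw [loopA.eq_def]; simp

theorem skipTag_eq (l : List Char) : skipTag l = (l.dropWhile (· ≠ '>')).drop 1 := by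
  induction l with
  | nil => simp [skipTag]
  | cons c cs ih =>
    by_cases h : c = '>' <;> simp [skipTag, List.dropWhile, h, ih]

theorem dropWhile_cons_head {α : Type} {p : α → Bool} :
    ∀ (l : List α) (a : α) (as : List α), l.dropWhile p = a :: as → p a = false := by
  intro l a as hh
  induction l with
  | nil => simp [List.dropWhile] at hh
  | cons c cs ih =>
    rw [List.dropWhile_cons] at hh
    split at hh
    · exact ih hh
    · next hp => injection hh with h1 _; subst h1; simpa using hp

-- processing a run of non-'<' chars one at a time (A) equals emitText on the run (B)
theorem loopA_text (t : List Char) (ht : ∀ c ∈ t, c ≠ '<') :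
    ∀ (rest : List Char) (tag : String) (pre flag : Int),
    loopA (t ++ rest) tag pre flag =
      ((emitText t tag flag).1.1 ++ (loopA rest (emitText t tag flag).2.1 pre (emitText t tag flag).2.2).1,
       (emitText t tag flag).1.2 ++ (loopA rest (emitText t tag flag).2.1 pre (emitText t tag flag).2.2).2) := by
  induction t with
  | nil => intro rest tag pre flag; simp [emitText]
  | cons c cs ih =>
    intro rest tag pre flag
    have hc : c ≠ '<' := ht c (by simp)
    have hcs : ∀ x ∈ cs, x ≠ '<' := fun x hx => ht x (by simp [hx])
    rw [List.cons_append, loopA_char c (cs ++ rest) hc,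
      ih hcs rest (if tag = "B" then "I" else tag) pre (if tag = "B" then 1 else flag)]
    simp [emitText]

theorem tokenizeB_tag_nil (rest : List Char) (h : rest.dropWhile (· ≠ '>') = []) :
    tokenizeB ('<' :: rest) = [('<' : Char) :: rest.takeWhile (· ≠ '>')] := by
  rw [tokenizeB.eq_def]
  simp only [ne_eq, decide_not] at h ⊢
  rw [if_pos trivial]
  split
  · rfl
  · next x rs' h2 =>
    simp only [decide_not] at h2
    rw [h] at h2
    cases h2

theorem tokenizeB_tag_cons (rest rs : List Char) (h : rest.dropWhile (· ≠ '>') = '>' :: rs) :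
    tokenizeB ('<' :: rest) = (('<' : Char) :: rest.takeWhile (· ≠ '>') ++ ['>']) :: tokenizeB rs := by
  rw [tokenizeB.eq_def]
  simp only [ne_eq, decide_not] at h ⊢
  rw [if_pos trivial]
  split
  · simp_all [decide_not]
  · next x rs' h2 =>
    simp only [decide_not] at h2
    rw [h] at h2
    injection h2 with _ h3
    rw [h3]

theorem tokenizeB_text (c : Char) (rest : List Char) (hc : c ≠ '<') :
    tokenizeB (c :: rest) =
      (c :: rest.takeWhile (· ≠ '<')) :: tokenizeB (rest.dropWhile (· ≠ '<')) := by
  rw [tokenizeB.eq_def]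
  simp [hc]

theorem runB_tag (b : Char) (body : List Char) (ts : List (List Char)) (tag : String) (pre flag : Int) :
    runB (('<' :: b :: body) :: ts) tag pre flag =
      (if b = '/' then runB ts (if pre - 1 = 0 then "O" else "I") (pre - 1) flag
       else if pre + 1 = 1 then runB ts "B" (pre + 1) 0
       else if flag = 1 then runB ts "I" (pre + 1) flag
       else runB ts tag (pre + 1) flag) := by
  simp only [runB]
  rw [if_neg (by simp)]
  by_cases hb : b = '/'
  · subst hb; rw [if_pos (by simp), if_pos rfl]
  · rw [if_neg (by simp [hb]), if_neg hb]

theorem main_equiv : ∀ (n : ℕ) (l : List Char), l.length ≤ n →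
    ∀ (tag : String) (pre flag : Int),
    loopA l tag pre flag = runB (tokenizeB l) tag pre flag := by
  intro n
  induction n with
  | zero =>
    intro l hl tag pre flag
    have : l = [] := List.length_eq_zero_iff.mp (Nat.le_zero.mp hl)
    subst this; simp [loopA_nil, tokenizeB, runB]
  | succ n ih =>
    intro l hl tag pre flag
    match l with
    | [] => simp [loopA_nil, tokenizeB, runB]
    | c :: rest =>
      by_cases hc : c = '<'
      · subst hc
        cases hdw : rest.dropWhile (· ≠ '>') with
        | nil =>
          -- no '>' after this '<': A skips to end of string; B emits one final token and stops
          rw [tokenizeB_tag_nil rest hdw]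
          have hskip : skipTag rest = [] := by rw [skipTag_eq, hdw]; rfl
          have hloop : loopA ('<' :: rest) tag pre flag = ([], []) := by
            cases rest with
            | nil => exact loopA_lone tag pre flag
            | cons d ds =>
              have hs : skipTag ('<' :: d :: ds) = [] := by
                rw [show skipTag ('<' :: d :: ds) = skipTag (d :: ds) from by simp [skipTag]]
                exact hskip
              rw [loopA_tag, hs]
              split_ifs <;> exact loopA_nil _ _ _
          have hrun : runB [('<' : Char) :: rest.takeWhile (· ≠ '>')] tag pre flag = ([], []) := by
            simp only [runB]
            split_ifs <;> simp_all
          rw [hloop, hrun]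
        | cons g rs =>
          have hg : g = '>' := by
            have := dropWhile_cons_head rest g rs hdw; simpa using this
          subst hg
          rw [tokenizeB_tag_cons rest rs hdw]
          have hrest : rest = rest.takeWhile (· ≠ '>') ++ '>' :: rs := by
            conv_lhs => rw [← List.takeWhile_append_dropWhile (p := (· ≠ '>')) (l := rest)]
            rw [hdw]
          have hskip : skipTag rest = rs := by rw [skipTag_eq, hdw]; rfl
          have hrs : rs.length ≤ n := by
            have h1 := congrArg List.length hrest
            simp at h1 hl; omega
          -- B's branch test on the token agrees with A's test of content[i+1]
          cases htw : rest.takeWhile (· ≠ '>') with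
          | nil =>
            -- token is "<>": an opening tag; A sees content[i+1] = '>' ≠ '/'
            have hr : rest = '>' :: rs := by rw [hrest, htw]; rfl
            have hs : skipTag ('<' :: '>' :: rs) = rs := by
              rw [show skipTag ('<' :: '>' :: rs) = skipTag ('>' :: rs) from by simp [skipTag],
                show skipTag ('>' :: rs) = rs from by simp [skipTag]]
            rw [hr, loopA_tag, hs]
            simp only [List.singleton_append]
            rw [runB_tag '>' [] (tokenizeB rs) tag pre flag]
            split_ifs <;> exact ih rs hrs _ _ _
          | cons b bs =>
            have hr : rest = b :: (bs ++ '>' :: rs) := by rw [hrest, htw]; rfl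
            have hs : skipTag ('<' :: b :: (bs ++ '>' :: rs)) = rs := by
              rw [show skipTag ('<' :: b :: (bs ++ '>' :: rs)) = skipTag (b :: (bs ++ '>' :: rs)) from by
                simp [skipTag]]
              rw [← hr]; exact hskip
            rw [hr, loopA_tag, hs]
            simp only [List.cons_append]
            rw [runB_tag b (bs ++ ['>']) (tokenizeB rs) tag pre flag]
            split_ifs <;> exact ih rs hrs _ _ _
      · -- text-run case
        rw [tokenizeB_text c rest hc]
        have htw : ∀ x ∈ c :: rest.takeWhile (· ≠ '<'), x ≠ '<' := by
          intro x hx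
          rcases List.mem_cons.mp hx with h | h
          · subst h; exact hc
          · have := List.mem_takeWhile_imp h; simpa using this
        have hsplit : c :: rest = (c :: rest.takeWhile (· ≠ '<')) ++ rest.dropWhile (· ≠ '<') := by
          simp [List.takeWhile_append_dropWhile]
        have hdl : (rest.dropWhile (· ≠ '<')).length ≤ n := by
          have h1 := List.length_dropWhile_le (fun x => !decide (x = '<')) rest
          simp at h1 hl ⊢; omega
        rw [hsplit, loopA_text _ htw, ih _ hdl]
        simp only [runB]
        rw [if_pos (by simp [hc])]

-- ===== VERDICT (by name: the statement is the Claim_ definition above) =====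
theorem content2uniformcontent_spec : Claim_equal_content2uniformcontent := by
  intro content _ _
  unfold Spec_content2uniformcontent content2uniformcontent content2uniformcontent_alt
  exact main_equiv content.toList.length content.toList (le_refl _) "O" 0 0
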